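-- pv_equiv track=rewrite | github.com/AugustinROULLET/weather_agent | src/services/weather_services.py | _get_temps_by_hour
-- ===== SOURCE A (Python) =====
-- from typing import Dict, Optional, Tuple
--
-- def _get_temps_by_hour(hourly: list, current_temp: int, min_temp: int, max_temp: int) -> Dict:
--     """gather temperature at some time of the day"""
--     morning_temp = current_temp
--     afternoon_temp = max_temp
--     evening_temp = min_temp
--
--     for hour in hourly:
--         hour_time = hour.get("time", "")
--         if hour_time == "900":
--             morning_temp = int(hour.get("tempC", morning_temp))
--         if hour_time == "1500":
--             afternoon_temp = int(hour.get("tempC", afternoon_temp))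
--         if hour_time == "2100":
--             evening_temp = int(hour.get("tempC", evening_temp))
--     return {"morning": morning_temp, "afternoon": afternoon_temp, "evening": evening_temp}
-- ===== SOURCE B (Python) =====
-- def _get_temps_by_hour(hourly: list, current_temp: int, min_temp: int, max_temp: int):
--     """gather temperature at some time of the day (index-based re-implementation)"""
--     index = {h.get("time", ""): h for h in hourly}
--
--     def pick(time, default):
--         if time in index:
--             return int(index[time].get("tempC", default))
--         return default
--
--     return {
--         "morning": pick("900", current_temp),
--         "afternoon": pick("1500", max_temp),
--         "evening": pick("2100", min_temp),
--     }
-- ===== Notes on version B (the rewrite author's own statement) =====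
-- stated objective: idiomatic
-- what changed: Replaces A's three-branch per-element scan with accumulator variables by building a last-wins {time: hour} index once (a dict comprehension) and computing each slot by a single direct lookup with its own default.
import Mathlib
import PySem

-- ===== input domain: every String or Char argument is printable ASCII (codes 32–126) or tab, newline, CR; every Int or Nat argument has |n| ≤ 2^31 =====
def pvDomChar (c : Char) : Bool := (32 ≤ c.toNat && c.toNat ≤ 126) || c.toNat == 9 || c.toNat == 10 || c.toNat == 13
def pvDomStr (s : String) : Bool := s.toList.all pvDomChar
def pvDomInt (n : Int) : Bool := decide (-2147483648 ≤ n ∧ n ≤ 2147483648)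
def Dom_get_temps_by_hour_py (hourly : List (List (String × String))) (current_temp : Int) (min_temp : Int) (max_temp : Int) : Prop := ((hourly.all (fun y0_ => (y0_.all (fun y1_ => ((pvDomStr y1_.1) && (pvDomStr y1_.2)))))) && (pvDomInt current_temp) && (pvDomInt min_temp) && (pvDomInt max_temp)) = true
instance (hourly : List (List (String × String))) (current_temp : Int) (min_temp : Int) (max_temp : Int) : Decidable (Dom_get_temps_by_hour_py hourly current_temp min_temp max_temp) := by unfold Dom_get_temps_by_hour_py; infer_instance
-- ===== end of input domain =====

-- B replaces A's three-branch per-element scan by building a last-wins time index once and doing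
-- three direct lookups (objective: idiomatic; same O(n) cost).

-- ===== PORT A =====
-- int(hour.get("tempC", prev)) : if "tempC" is present its value is parsed (ofStr? = none is a
-- ValueError, excluded by Pre_, so .getD 0 is never the result inside Pre_); otherwise the int
-- default `prev` is returned unchanged.
def pyTempInt (hour : List (String × String)) (prev : Int) : Int :=
  match hour.lookup "tempC" with
  | some s => (PySem.Int.ofStr? s).getD 0
  | none => prev

def get_temps_by_hour_py (hourly : List (List (String × String))) (current_temp : Int) (min_temp : Int) (max_temp : Int) : List (String × Int) :=
  let st := hourly.foldl (fun (st : Int × Int × Int) hour =>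
    let hour_time := (hour.lookup "time").getD ""
    let m := if hour_time = "900" then pyTempInt hour st.1 else st.1
    let a := if hour_time = "1500" then pyTempInt hour st.2.1 else st.2.1
    let e := if hour_time = "2100" then pyTempInt hour st.2.2 else st.2.2
    (m, a, e)) (current_temp, max_temp, min_temp)
  [("morning", st.1), ("afternoon", st.2.1), ("evening", st.2.2)]

-- ===== PORT B =====
-- pick(time, default): look the hour up in the index; int() of its "tempC" (ofStr? = none is the
-- ValueError excluded by Pre_), else the default.
def pickTemp (index : PySem.Dict String (List (String × String))) (time : String) (default : Int) : Int :=
  match index.get? time with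
  | some h =>
      match h.lookup "tempC" with
      | some s => (PySem.Int.ofStr? s).getD 0
      | none => default
  | none => default

def get_temps_by_hour_py_alt (hourly : List (List (String × String))) (current_temp : Int) (min_temp : Int) (max_temp : Int) : List (String × Int) :=
  let index := hourly.foldl (fun d h => d.insert ((h.lookup "time").getD "") h) PySem.Dict.empty
  [("morning", pickTemp index "900" current_temp),
   ("afternoon", pickTemp index "1500" max_temp),
   ("evening", pickTemp index "2100" min_temp)]

-- ===== PRECONDITION & SPEC =====
-- Pre_ excludes (a) inputs where Python's int() raises ValueError (an hour at a relevant time whose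
-- "tempC" is not int-parseable), and (b) a defensible duplicate-key corner: lists with several hours
-- of the same relevant time whose LAST occurrence lacks "tempC" while an earlier one has it — there
-- A's default chains through the earlier entries' values while B uses the slot default, and neither
-- behaviour is specified.
def Pre_get_temps_by_hour_py (hourly : List (List (String × String))) (current_temp : Int) (min_temp : Int) (max_temp : Int) : Prop :=
  (∀ h ∈ hourly, ((h.lookup "time").getD "") ∈ ["900", "1500", "2100"] →
      ∀ s ∈ (h.lookup "tempC").toList, PySem.Int.ofStr? s ≠ none)
  ∧ ∀ t ∈ ["900", "1500", "2100"],
      ∀ g ∈ ((hourly.filter (fun h => (h.lookup "time").getD "" == t)).getLast?).toList,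
        g.lookup "tempC" = none →
        ∀ h ∈ hourly.filter (fun h => (h.lookup "time").getD "" == t), h.lookup "tempC" = none
instance (hourly : List (List (String × String))) (current_temp : Int) (min_temp : Int) (max_temp : Int) : Decidable (Pre_get_temps_by_hour_py hourly current_temp min_temp max_temp) := by unfold Pre_get_temps_by_hour_py; infer_instance

def pvWitness_get_temps_by_hour_py : (List (List (String × String))) × Int × Int × Int :=
  ([[("time", "900"), ("tempC", "12")], [("time", "1500")], [("time", "300"), ("tempC", "x")]], 5, 1, 9)

def Spec_get_temps_by_hour_py (hourly : List (List (String × String))) (current_temp : Int) (min_temp : Int) (max_temp : Int) (out : List (String × Int)) : Prop := out = get_temps_by_hour_py_alt hourly current_temp min_temp max_temp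
instance (hourly : List (List (String × String))) (current_temp : Int) (min_temp : Int) (max_temp : Int) (out : List (String × Int)) : Decidable (Spec_get_temps_by_hour_py hourly current_temp min_temp max_temp out) := by unfold Spec_get_temps_by_hour_py; infer_instance

-- ===== CLAIM (what is proved, stated in full; the proofs are below) =====
def Claim_equal_get_temps_by_hour_py : Prop := ∀ (hourly : List (List (String × String))) (current_temp : Int) (min_temp : Int) (max_temp : Int), Dom_get_temps_by_hour_py hourly current_temp min_temp max_temp → Pre_get_temps_by_hour_py hourly current_temp min_temp max_temp → Spec_get_temps_by_hour_py hourly current_temp min_temp max_temp (get_temps_by_hour_py hourly current_temp min_temp max_temp)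

-- ===== LEMMAS AND PROOFS =====

-- one slot of A's loop, in isolation
def slotFold (hourly : List (List (String × String))) (init : Int) (t : String) : Int :=
  hourly.foldl (fun v h => if (h.lookup "time").getD "" = t then pyTempInt h v else v) init

-- A's triple fold is three independent slot folds
theorem tripleFold_eq (hourly : List (List (String × String))) :
    ∀ a b c : Int,
      hourly.foldl (fun (st : Int × Int × Int) hour =>
        let hour_time := (hour.lookup "time").getD ""
        let m := if hour_time = "900" then pyTempInt hour st.1 else st.1
        let a := if hour_time = "1500" then pyTempInt hour st.2.1 else st.2.1
        let e := if hour_time = "2100" then pyTempInt hour st.2.2 else st.2.2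
        (m, a, e)) (a, b, c)
      = (slotFold hourly a "900", slotFold hourly b "1500", slotFold hourly c "2100") := by
  induction hourly with
  | nil => intro a b c; rfl
  | cons h hs ih =>
      intro a b c
      simp only [List.foldl_cons, slotFold] at *
      exact ih _ _ _

-- a slot fold is a fold over the filtered list
theorem slotFold_eq_filter (hourly : List (List (String × String))) :
    ∀ (init : Int) (t : String),
      slotFold hourly init t
        = (hourly.filter (fun h => (h.lookup "time").getD "" == t)).foldl
            (fun v h => pyTempInt h v) init := by
  induction hourly with
  | nil => intro init t; rfl
  | cons h hs ih =>
      intro init t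
      simp only [slotFold, List.foldl_cons, List.filter_cons] at *
      by_cases hc : (h.lookup "time").getD "" = t
      · simp [hc, ih]
      · simp [hc, ih]

-- the index built by B answers "last hour with this time"
theorem index_get?_eq (hourly : List (List (String × String))) :
    ∀ (d : PySem.Dict String (List (String × String))) (t : String),
      (hourly.foldl (fun d h => d.insert ((h.lookup "time").getD "") h) d).get? t
        = match (hourly.filter (fun h => (h.lookup "time").getD "" == t)).getLast? with
          | some g => some g
          | none => d.get? t := by
  induction hourly with
  | nil => intro d t; rfl
  | cons h hs ih =>
      intro d t
      simp only [List.foldl_cons, List.filter_cons]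
      rw [ih]
      by_cases hc : (h.lookup "time").getD "" = t
      · simp only [hc, beq_self_eq_true, if_pos]
        cases hlast : (hs.filter (fun h => (h.lookup "time").getD "" == t)).getLast? with
        | none =>
            have : hs.filter (fun h => (h.lookup "time").getD "" == t) = [] :=
              List.getLast?_eq_none_iff.mp hlast
            simp [this, PySem.Dict.get?_insert_self]
        | some g =>
            have hne : hs.filter (fun h => (h.lookup "time").getD "" == t) ≠ [] := by
              intro he; rw [he] at hlast; simp at hlast
            simp [List.getLast?_cons, hlast]
      · have hbeq : ((h.lookup "time").getD "" == t) = false := beq_false_of_ne hc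
        simp only [hbeq, if_neg Bool.false_ne_true]
        cases (hs.filter (fun h => (h.lookup "time").getD "" == t)).getLast? with
        | none => exact PySem.Dict.get?_insert_of_ne d h (fun he => hc he.symm)
        | some g => rfl

-- under Pre_'s duplicate condition, the fold over the filtered list is decided by its last element
theorem filterFold_eq_last (l : List (List (String × String))) :
    ∀ init : Int,
      (∀ g ∈ l.getLast?.toList, g.lookup "tempC" = none → ∀ h ∈ l, h.lookup "tempC" = none) →
      l.foldl (fun v h => pyTempInt h v) init
        = match l.getLast? with
          | some g => pyTempInt g init
          | none => init := by
  induction l with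
  | nil => intro init _; rfl
  | cons h hs ih =>
      intro init hyp
      cases hs with
      | nil => rfl
      | cons h' t =>
          cases hg : (h' :: t).getLast? with
          | none => simp at hg
          | some g =>
              have hlast : (h :: h' :: t).getLast? = some g := by
                rw [List.getLast?_cons_cons, hg]
              rw [List.foldl_cons]
              cases hgc : g.lookup "tempC" with
              | some s =>
                  have hyp' : ∀ g' ∈ (h' :: t).getLast?.toList, g'.lookup "tempC" = none →
                      ∀ x ∈ (h' :: t), x.lookup "tempC" = none := by
                    intro g' hg' hnone x hx
                    rw [hg] at hg'; simp at hg'; subst hg'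
                    rw [hgc] at hnone; cases hnone
                  rw [ih _ hyp', hg, hlast]
                  simp [pyTempInt, hgc]
              | none =>
                  have hall : ∀ x ∈ (h :: h' :: t), x.lookup "tempC" = none := by
                    intro x hx
                    exact hyp g (by simp [hlast]) hgc x hx
                  have hstep : pyTempInt h init = init := by
                    simp [pyTempInt, hall h (by simp)]
                  have hyp' : ∀ g' ∈ (h' :: t).getLast?.toList, g'.lookup "tempC" = none →
                      ∀ x ∈ (h' :: t), x.lookup "tempC" = none := by
                    intro g' _ _ x hx
                    exact hall x (by simp [hx])
                  rw [hstep, ih _ hyp', hg, hlast]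

-- one slot end to end: A's slot value equals B's pick on the index
theorem slot_eq_pick (hourly : List (List (String × String))) (init : Int) (t : String)
    (hyp : ∀ g ∈ ((hourly.filter (fun h => (h.lookup "time").getD "" == t)).getLast?).toList,
        g.lookup "tempC" = none →
        ∀ h ∈ hourly.filter (fun h => (h.lookup "time").getD "" == t), h.lookup "tempC" = none) :
    slotFold hourly init t
      = pickTemp (hourly.foldl (fun d h => d.insert ((h.lookup "time").getD "") h) PySem.Dict.empty)
          t init := by
  rw [slotFold_eq_filter, filterFold_eq_last _ _ hyp]
  unfold pickTemp
  rw [index_get?_eq]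
  cases (hourly.filter (fun h => (h.lookup "time").getD "" == t)).getLast? with
  | none => simp [PySem.Dict.get?_empty]
  | some g => simp [pyTempInt]

-- ===== VERDICT (by name: the statement is the Claim_ definition above) =====
theorem get_temps_by_hour_py_spec : Claim_equal_get_temps_by_hour_py := by
  intro hourly ct mn mx _ hpre
  unfold Spec_get_temps_by_hour_py get_temps_by_hour_py get_temps_by_hour_py_alt
  simp only []
  rw [tripleFold_eq]
  obtain ⟨_, hdup⟩ := hpre
  rw [slot_eq_pick hourly ct "900" (hdup "900" (by simp)),
      slot_eq_pick hourly mx "1500" (hdup "1500" (by simp)),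
      slot_eq_pick hourly mn "2100" (hdup "2100" (by simp))]
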